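-- pv_equiv track=rewrite | github.com/X-PLUG/ChatPLUG | XDPX/xdpx/utils/__init__.py | diff_params
-- ===== SOURCE A (Python) =====
-- def diff_params(args1, args2, exclude=['save_dir']):
--     if not isinstance(args1, dict):
--         args1 = vars(args1)
--     if not isinstance(args2, dict):
--         args2 = vars(args2)
--     exclude = set(exclude)
--     diff = []
--     for key1, val1 in args1.items():
--         if key1 in exclude or key1.startswith('__'):
--             continue
--         if key1 not in args2:
--             diff.append(f'-- {key1}: {val1}')
--         elif val1 != args2[key1]:
--             diff.append(f'+- {key1}: {val1} -> {args2[key1]}')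
--     for key2, val2 in args2.items():
--         if key2 in exclude or key2.startswith('__'):
--             continue
--         if key2 not in args1:
--             diff.append(f'++ {key2}: {val2}')
--     diff.sort()
--     return diff
-- ===== SOURCE B (Python) =====
-- def diff_params(args1, args2, exclude=['save_dir']):
--     ex = set(exclude)
--
--     def keep(k):
--         return k not in ex and not k.startswith('__')
--
--     it1 = sorted(((k, v) for k, v in args1.items() if keep(k)), key=lambda kv: kv[0])
--     it2 = sorted(((k, v) for k, v in args2.items() if keep(k)), key=lambda kv: kv[0])
--     lines = []
--     i = j = 0
--     while i < len(it1) and j < len(it2):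
--         k1, v1 = it1[i]
--         k2, v2 = it2[j]
--         if k1 < k2:
--             lines.append(f'-- {k1}: {v1}')
--             i += 1
--         elif k2 < k1:
--             lines.append(f'++ {k2}: {v2}')
--             j += 1
--         else:
--             if v1 != v2:
--                 lines.append(f'+- {k1}: {v1} -> {v2}')
--             i += 1
--             j += 1
--     for k, v in it1[i:]:
--         lines.append(f'-- {k}: {v}')
--     for k, v in it2[j:]:
--         lines.append(f'++ {k}: {v}')
--     lines.sort()
--     return lines
-- ===== Notes on version B (the rewrite author's own statement) =====
-- stated objective: alternative
-- what changed: B removes A's dict-membership tests entirely: it filters and sorts each side's items by key once, then classifies every key with a single two-pointer merge over the two sorted item lists (key comparison at the merge front decides --/++/+-), and finally sorts the collected lines.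
import Mathlib
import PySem

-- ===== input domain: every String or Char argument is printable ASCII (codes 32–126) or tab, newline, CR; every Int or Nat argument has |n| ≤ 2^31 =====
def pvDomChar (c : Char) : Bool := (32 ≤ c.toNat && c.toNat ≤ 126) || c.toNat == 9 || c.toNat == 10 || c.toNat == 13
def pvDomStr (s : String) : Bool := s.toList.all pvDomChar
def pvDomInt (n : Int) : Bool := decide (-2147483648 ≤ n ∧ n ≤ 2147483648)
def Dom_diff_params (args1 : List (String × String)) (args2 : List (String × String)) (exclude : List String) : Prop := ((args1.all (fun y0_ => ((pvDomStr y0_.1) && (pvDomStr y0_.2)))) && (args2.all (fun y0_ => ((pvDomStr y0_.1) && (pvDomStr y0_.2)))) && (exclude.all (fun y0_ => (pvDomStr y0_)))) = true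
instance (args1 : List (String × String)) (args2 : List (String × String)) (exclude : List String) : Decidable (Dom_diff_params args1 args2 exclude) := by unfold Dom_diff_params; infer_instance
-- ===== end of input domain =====

-- B classifies keys by a two-pointer merge of the two key-sorted, filtered item lists instead of A's
-- two dict-membership passes; same output, similar cost (objective: alternative).

-- ===== PORT A =====
def diff_params (args1 : List (String × String)) (args2 : List (String × String)) (exclude : List String) : List String :=
  let a1 := PySem.Dict.ofList args1
  let a2 := PySem.Dict.ofList args2
  let ex : PySem.Set String := PySem.Set.ofList exclude
  let diff1 := a1.items.foldl (fun diff kv =>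
    if ex.contains kv.1 || PySem.Str.startswith kv.1 "__" then diff
    else if !a2.contains kv.1 then diff ++ ["-- " ++ kv.1 ++ ": " ++ kv.2]
    else if kv.2 ≠ a2.getD kv.1 "" then diff ++ ["+- " ++ kv.1 ++ ": " ++ kv.2 ++ " -> " ++ a2.getD kv.1 ""]
    else diff) []
  let diff2 := a2.items.foldl (fun diff kv =>
    if ex.contains kv.1 || PySem.Str.startswith kv.1 "__" then diff
    else if !a1.contains kv.1 then diff ++ ["++ " ++ kv.1 ++ ": " ++ kv.2]
    else diff) diff1
  PySem.List.sorted diff2 (fun x => x) false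

-- ===== PORT B =====
-- keep(k) = k not in ex and not k.startswith('__')
def pvKeep (ex : PySem.Set String) (k : String) : Bool :=
  !ex.contains k && !(PySem.Str.startswith k "__")

-- the while loop with two indices, as the equivalent structural merge recursion
def pvMerge : List (String × String) → List (String × String) → List String
  | [], l2 => l2.map (fun kv => "++ " ++ kv.1 ++ ": " ++ kv.2)
  | l1, [] => l1.map (fun kv => "-- " ++ kv.1 ++ ": " ++ kv.2)
  | (k1, v1) :: t1, (k2, v2) :: t2 =>
    if k1 < k2 then ("-- " ++ k1 ++ ": " ++ v1) :: pvMerge t1 ((k2, v2) :: t2)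
    else if k2 < k1 then ("++ " ++ k2 ++ ": " ++ v2) :: pvMerge ((k1, v1) :: t1) t2
    else (if v1 ≠ v2 then ["+- " ++ k1 ++ ": " ++ v1 ++ " -> " ++ v2] else []) ++ pvMerge t1 t2

def diff_params_alt (args1 : List (String × String)) (args2 : List (String × String)) (exclude : List String) : List String :=
  let a1 := PySem.Dict.ofList args1
  let a2 := PySem.Dict.ofList args2
  let ex : PySem.Set String := PySem.Set.ofList exclude
  let it1 := PySem.List.sorted (a1.items.filter (fun kv => pvKeep ex kv.1)) (fun kv => kv.1) false
  let it2 := PySem.List.sorted (a2.items.filter (fun kv => pvKeep ex kv.1)) (fun kv => kv.1) false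
  PySem.List.sorted (pvMerge it1 it2) (fun x => x) false

-- ===== PRECONDITION & SPEC =====
def Spec_diff_params (args1 : List (String × String)) (args2 : List (String × String)) (exclude : List String) (out : List String) : Prop := out = diff_params_alt args1 args2 exclude
instance (args1 : List (String × String)) (args2 : List (String × String)) (exclude : List String) (out : List String) : Decidable (Spec_diff_params args1 args2 exclude out) := by unfold Spec_diff_params; infer_instance

-- ===== CLAIM (what is proved, stated in full; the proofs are below) =====
def Claim_equal_diff_params : Prop := ∀ (args1 : List (String × String)) (args2 : List (String × String)) (exclude : List String), Dom_diff_params args1 args2 exclude → Spec_diff_params args1 args2 exclude (diff_params args1 args2 exclude)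

-- ===== LEMMAS AND PROOFS =====

-- per-key line contribution of A's first loop / second loop
def pvG1 (ex : PySem.Set String) (a2 : PySem.Dict String String) (kv : String × String) : List String :=
  if ex.contains kv.1 || PySem.Str.startswith kv.1 "__" then []
  else if !a2.contains kv.1 then ["-- " ++ kv.1 ++ ": " ++ kv.2]
  else if kv.2 ≠ a2.getD kv.1 "" then ["+- " ++ kv.1 ++ ": " ++ kv.2 ++ " -> " ++ a2.getD kv.1 ""]
  else []

def pvG2 (ex : PySem.Set String) (a1 : PySem.Dict String String) (kv : String × String) : List String :=
  if ex.contains kv.1 || PySem.Str.startswith kv.1 "__" then []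
  else if !a1.contains kv.1 then ["++ " ++ kv.1 ++ ": " ++ kv.2]
  else []

-- per-key classification against an association list (lookup = first match)
def pvF1 (l2 : List (String × String)) (kv : String × String) : List String :=
  match List.lookup kv.1 l2 with
  | none => ["-- " ++ kv.1 ++ ": " ++ kv.2]
  | some v2 => if kv.2 ≠ v2 then ["+- " ++ kv.1 ++ ": " ++ kv.2 ++ " -> " ++ v2] else []

def pvF2 (l1 : List (String × String)) (kv : String × String) : List String :=
  if (List.lookup kv.1 l1).isNone then ["++ " ++ kv.1 ++ ": " ++ kv.2] else []

theorem fold1_eq (ex : PySem.Set String) (a2 : PySem.Dict String String) (l : List (String × String)) (init : List String) :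
    l.foldl (fun diff kv =>
      if ex.contains kv.1 || PySem.Str.startswith kv.1 "__" then diff
      else if !a2.contains kv.1 then diff ++ ["-- " ++ kv.1 ++ ": " ++ kv.2]
      else if kv.2 ≠ a2.getD kv.1 "" then diff ++ ["+- " ++ kv.1 ++ ": " ++ kv.2 ++ " -> " ++ a2.getD kv.1 ""]
      else diff) init = init ++ l.flatMap (pvG1 ex a2) := by
  have h : (fun (diff : List String) (kv : String × String) =>
      if ex.contains kv.1 || PySem.Str.startswith kv.1 "__" then diff
      else if !a2.contains kv.1 then diff ++ ["-- " ++ kv.1 ++ ": " ++ kv.2]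
      else if kv.2 ≠ a2.getD kv.1 "" then diff ++ ["+- " ++ kv.1 ++ ": " ++ kv.2 ++ " -> " ++ a2.getD kv.1 ""]
      else diff) = fun diff kv => diff ++ pvG1 ex a2 kv := by
    funext diff kv; unfold pvG1; split_ifs <;> simp
  rw [h, PySem.List.foldl_append_eq_flatMap]

theorem fold2_eq (ex : PySem.Set String) (a1 : PySem.Dict String String) (l : List (String × String)) (init : List String) :
    l.foldl (fun diff kv =>
      if ex.contains kv.1 || PySem.Str.startswith kv.1 "__" then diff
      else if !a1.contains kv.1 then diff ++ ["++ " ++ kv.1 ++ ": " ++ kv.2]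
      else diff) init = init ++ l.flatMap (pvG2 ex a1) := by
  have h : (fun (diff : List String) (kv : String × String) =>
      if ex.contains kv.1 || PySem.Str.startswith kv.1 "__" then diff
      else if !a1.contains kv.1 then diff ++ ["++ " ++ kv.1 ++ ": " ++ kv.2]
      else diff) = fun diff kv => diff ++ pvG2 ex a1 kv := by
    funext diff kv; unfold pvG2; split_ifs <;> simp
  rw [h, PySem.List.foldl_append_eq_flatMap]

-- lookup is none iff the key is absent
theorem lookup_eq_none_iff (k : String) (l : List (String × String)) :
    List.lookup k l = none ↔ k ∉ l.map Prod.fst := by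
  induction l with
  | nil => simp
  | cons p t ih =>
    cases p with
    | mk a b =>
      by_cases h : a = k
      · simp [List.lookup, h]
      · have hb : (k == a) = false := by simp [Ne.symm h]
        simp [List.lookup, hb, ih, Ne.symm h]

theorem lookup_eq_some_iff (k : String) (v : String) (l : List (String × String))
    (hnd : (l.map Prod.fst).Nodup) :
    List.lookup k l = some v ↔ (k, v) ∈ l := by
  induction l with
  | nil => simp
  | cons p t ih =>
    cases p with
    | mk a b =>
      simp only [List.map_cons, List.nodup_cons] at hnd
      by_cases h : a = k
      · subst h
        simp only [List.lookup, beq_self_eq_true, List.mem_cons]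
        constructor
        · rintro h'; left; cases h'; rfl
        · rintro (h' | h')
          · cases h'; rfl
          · have : a ∈ List.map Prod.fst t := List.mem_map_of_mem h'
            exact absurd this hnd.1
      · have hb : (k == a) = false := by simp [Ne.symm h]
        simp [List.lookup, hb, ih hnd.2, Ne.symm h]

theorem lookup_cons_ne {k a b : String} (t : List (String × String)) (hne : k ≠ a) :
    List.lookup k ((a, b) :: t) = List.lookup k t := by
  have hb : (k == a) = false := by simp [hne]
  simp [List.lookup, hb]

theorem flatMap_single {α β : Type} (f : α → β) (l : List α) :
    l.flatMap (fun x => [f x]) = l.map f := by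
  induction l with
  | nil => rfl
  | cons x t ih => simp [ih]

-- the merge produces, up to permutation, the per-key classification lines
theorem merge_perm : ∀ (l1 l2 : List (String × String)),
    l1.Pairwise (fun a b => a.1 < b.1) → l2.Pairwise (fun a b => a.1 < b.1) →
    (pvMerge l1 l2).Perm (l1.flatMap (pvF1 l2) ++ l2.flatMap (pvF2 l1)) := by
  intro l1 l2
  induction l1, l2 using pvMerge.induct with
  | case1 l2 =>
    intro _ _
    have h : ∀ kv ∈ l2, pvF2 ([] : List (String × String)) kv = ["++ " ++ kv.1 ++ ": " ++ kv.2] := by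
      intro kv _; simp [pvF2, List.lookup]
    rw [List.flatMap_congr h]
    simp [pvMerge]
    rw [flatMap_single (fun kv : String × String => "++ " ++ kv.1 ++ ": " ++ kv.2) l2]
  | case2 l1 hne =>
    intro _ _
    cases l1 with
    | nil => exact absurd rfl hne
    | cons p t =>
      have h : ∀ kv ∈ p :: t, pvF1 ([] : List (String × String)) kv = ["-- " ++ kv.1 ++ ": " ++ kv.2] := by
        intro kv _; simp [pvF1, List.lookup]
      rw [List.flatMap_congr h]
      simp [pvMerge]
      rw [flatMap_single (fun kv : String × String => "-- " ++ kv.1 ++ ": " ++ kv.2) t]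
  | case3 k1 v1 t1 k2 v2 t2 hlt ih =>
    intro hp1 hp2
    have hp2' := List.pairwise_cons.mp hp2
    have hk1 : ∀ kv ∈ (k2, v2) :: t2, k1 < kv.1 := by
      intro kv hkv
      rcases List.mem_cons.mp hkv with h | h
      · cases h; exact hlt
      · exact lt_trans hlt (hp2'.1 kv h)
    have hmerge : pvMerge ((k1, v1) :: t1) ((k2, v2) :: t2)
        = ("-- " ++ k1 ++ ": " ++ v1) :: pvMerge t1 ((k2, v2) :: t2) := by
      simp [pvMerge, hlt]
    have hnone : List.lookup k1 ((k2, v2) :: t2) = none := by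
      rw [lookup_eq_none_iff]
      intro hmem
      rcases List.mem_map.mp hmem with ⟨kv, hkv, hfst⟩
      exact absurd (hfst ▸ hk1 kv hkv) (lt_irrefl _)
    have hf1 : pvF1 ((k2, v2) :: t2) (k1, v1) = ["-- " ++ k1 ++ ": " ++ v1] := by
      simp [pvF1, hnone]
    have hf2 : ((k2, v2) :: t2).flatMap (pvF2 ((k1, v1) :: t1))
        = ((k2, v2) :: t2).flatMap (pvF2 t1) := by
      apply List.flatMap_congr
      intro kv hkv
      have hne : kv.1 ≠ k1 := ne_of_gt (hk1 kv hkv)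
      unfold pvF2
      rw [lookup_cons_ne _ hne]
    rw [hmerge, hf2, List.flatMap_cons, hf1]
    simp only [List.cons_append, List.append_assoc]
    exact (ih (List.Pairwise.of_cons hp1) hp2).cons _
  | case4 k1 v1 t1 k2 v2 t2 hnlt hlt ih =>
    intro hp1 hp2
    have hp1' := List.pairwise_cons.mp hp1
    have hk2 : ∀ kv ∈ (k1, v1) :: t1, k2 < kv.1 := by
      intro kv hkv
      rcases List.mem_cons.mp hkv with h | h
      · cases h; exact hlt
      · exact lt_trans hlt (hp1'.1 kv h)
    have hmerge : pvMerge ((k1, v1) :: t1) ((k2, v2) :: t2)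
        = ("++ " ++ k2 ++ ": " ++ v2) :: pvMerge ((k1, v1) :: t1) t2 := by
      simp [pvMerge, hnlt, hlt]
    have hnone : List.lookup k2 ((k1, v1) :: t1) = none := by
      rw [lookup_eq_none_iff]
      intro hmem
      rcases List.mem_map.mp hmem with ⟨kv, hkv, hfst⟩
      exact absurd (hfst ▸ hk2 kv hkv) (lt_irrefl _)
    have hf2 : pvF2 ((k1, v1) :: t1) (k2, v2) = ["++ " ++ k2 ++ ": " ++ v2] := by
      simp [pvF2, hnone]
    have hf1 : ((k1, v1) :: t1).flatMap (pvF1 ((k2, v2) :: t2))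
        = ((k1, v1) :: t1).flatMap (pvF1 t2) := by
      apply List.flatMap_congr
      intro kv hkv
      have hne : kv.1 ≠ k2 := ne_of_gt (hk2 kv hkv)
      unfold pvF1
      rw [lookup_cons_ne _ hne]
    have hsplit : ((k2, v2) :: t2).flatMap (pvF2 ((k1, v1) :: t1))
        = ["++ " ++ k2 ++ ": " ++ v2] ++ t2.flatMap (pvF2 ((k1, v1) :: t1)) := by
      rw [List.flatMap_cons, hf2]
    rw [hmerge, hf1, hsplit]
    exact ((ih hp1 (List.Pairwise.of_cons hp2)).cons _).trans List.perm_middle.symm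
  | case5 k1 v1 t1 k2 v2 t2 hnlt1 hnlt2 ih =>
    intro hp1 hp2
    have heq : k1 = k2 := le_antisymm (not_lt.mp hnlt2) (not_lt.mp hnlt1)
    subst heq
    have hp1' := List.pairwise_cons.mp hp1
    have hp2' := List.pairwise_cons.mp hp2
    have hmerge : pvMerge ((k1, v1) :: t1) ((k1, v2) :: t2)
        = (if v1 ≠ v2 then ["+- " ++ k1 ++ ": " ++ v1 ++ " -> " ++ v2] else []) ++ pvMerge t1 t2 := by
      simp [pvMerge]
    have hf1h : pvF1 ((k1, v2) :: t2) (k1, v1)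
        = if v1 ≠ v2 then ["+- " ++ k1 ++ ": " ++ v1 ++ " -> " ++ v2] else [] := by
      simp [pvF1, List.lookup]
    have hf2h : pvF2 ((k1, v1) :: t1) (k1, v2) = [] := by
      simp [pvF2, List.lookup]
    have hf1t : t1.flatMap (pvF1 ((k1, v2) :: t2)) = t1.flatMap (pvF1 t2) := by
      apply List.flatMap_congr
      intro kv hkv
      have hne : kv.1 ≠ k1 := ne_of_gt (hp1'.1 kv hkv)
      unfold pvF1
      rw [lookup_cons_ne _ hne]
    have hf2t : t2.flatMap (pvF2 ((k1, v1) :: t1)) = t2.flatMap (pvF2 t1) := by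
      apply List.flatMap_congr
      intro kv hkv
      have hne : kv.1 ≠ k1 := ne_of_gt (hp2'.1 kv hkv)
      unfold pvF2
      rw [lookup_cons_ne _ hne]
    rw [hmerge, List.flatMap_cons, List.flatMap_cons, hf1h, hf2h, hf1t, hf2t]
    simp only [List.nil_append, List.append_assoc]
    exact List.Perm.append_left _ (ih (List.Pairwise.of_cons hp1) (List.Pairwise.of_cons hp2))

-- A's output lines, as a flatMap over the filtered items
theorem flatMap_filter_ite {α β : Type} (p : α → Bool) (f : α → List β) (l : List α) :
    (l.filter p).flatMap f = l.flatMap (fun x => if p x then f x else []) := by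
  induction l with
  | nil => simp
  | cons x t ih => by_cases h : p x <;> simp [h, ih]

-- nodup keys of the sorted, filtered item list
theorem nodup_fst_it (args : List (String × String)) (ex : PySem.Set String) :
    ((PySem.List.sorted (((PySem.Dict.ofList args).items).filter (fun kv => pvKeep ex kv.1)) (fun kv => kv.1) false).map Prod.fst).Nodup := by
  have hperm : (PySem.List.sorted (((PySem.Dict.ofList args).items).filter (fun kv => pvKeep ex kv.1)) (fun kv => kv.1) false).Perm (((PySem.Dict.ofList args).items).filter (fun kv => pvKeep ex kv.1)) :=
    PySem.List.sorted_perm _ _ _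
  have hkeys : (((PySem.Dict.ofList args).items).map Prod.fst).Nodup := by
    have := PySem.Dict.nodup_keys_ofList (κ := String) (ν := String) args
    simpa [PySem.Dict.keys] using this
  have hsub : ((((PySem.Dict.ofList args).items).filter (fun kv => pvKeep ex kv.1)).map Prod.fst).Sublist (((PySem.Dict.ofList args).items).map Prod.fst) :=
    List.Sublist.map Prod.fst List.filter_sublist
  exact ((hperm.map Prod.fst).nodup_iff).mpr (hkeys.sublist hsub)

-- strictly increasing keys of the sorted, filtered item list
theorem pairwise_lt_it (args : List (String × String)) (ex : PySem.Set String) :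
    (PySem.List.sorted (((PySem.Dict.ofList args).items).filter (fun kv => pvKeep ex kv.1)) (fun kv => kv.1) false).Pairwise (fun a b => a.1 < b.1) := by
  have hle : (PySem.List.sorted (((PySem.Dict.ofList args).items).filter (fun kv => pvKeep ex kv.1)) (fun kv => kv.1) false).Pairwise (fun a b => a.1 ≤ b.1) :=
    PySem.List.sorted_pairwise _ _
  have hnd := nodup_fst_it args ex
  rw [List.Nodup, List.pairwise_map] at hnd
  exact (hle.and hnd).imp (fun h => lt_of_le_of_ne h.1 h.2)

-- looking a kept key up in the sorted, filtered item list = the dict lookup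
theorem lookup_it_eq_get? (args : List (String × String)) (ex : PySem.Set String) (k : String)
    (hk : pvKeep ex k = true) :
    List.lookup k (PySem.List.sorted (((PySem.Dict.ofList args).items).filter (fun kv => pvKeep ex kv.1)) (fun kv => kv.1) false)
      = (PySem.Dict.ofList args).get? k := by
  have hperm : (PySem.List.sorted (((PySem.Dict.ofList args).items).filter (fun kv => pvKeep ex kv.1)) (fun kv => kv.1) false).Perm (((PySem.Dict.ofList args).items).filter (fun kv => pvKeep ex kv.1)) :=
    PySem.List.sorted_perm _ _ _
  have hkeysnd : (PySem.Dict.ofList args).keys.Nodup := PySem.Dict.nodup_keys_ofList args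
  cases hop : (PySem.Dict.ofList args).get? k with
  | some v =>
    rw [lookup_eq_some_iff _ _ _ (nodup_fst_it args ex)]
    rw [hperm.mem_iff, List.mem_filter]
    exact ⟨PySem.Dict.mem_items_of_get?_eq_some _ hop, hk⟩
  | none =>
    rw [lookup_eq_none_iff]
    intro hmem
    rcases List.mem_map.mp hmem with ⟨kv, hkv, hfst⟩
    have hkv' : kv ∈ ((PySem.Dict.ofList args).items).filter (fun kv => pvKeep ex kv.1) := hperm.mem_iff.mp hkv
    have hitems : kv ∈ (PySem.Dict.ofList args).items := (List.mem_filter.mp hkv').1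
    have : (PySem.Dict.ofList args).get? kv.1 = some kv.2 :=
      PySem.Dict.get?_of_mem_items _ hitems hkeysnd
    rw [hfst] at this
    rw [hop] at this
    simp at this

-- on kept keys, A's first-loop contribution is the assoc-list classification
theorem pvG1_eq_pvF1 (args2 : List (String × String)) (ex : PySem.Set String) (kv : String × String)
    (hk : pvKeep ex kv.1 = true) :
    pvG1 ex (PySem.Dict.ofList args2) kv
      = pvF1 (PySem.List.sorted (((PySem.Dict.ofList args2).items).filter (fun kv => pvKeep ex kv.1)) (fun kv => kv.1) false) kv := by
  have hks := hk
  unfold pvKeep at hks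
  rw [Bool.and_eq_true, Bool.not_eq_true', Bool.not_eq_true'] at hks
  have hc : ex.contains kv.1 = false := hks.1
  have hs : PySem.Str.startswith kv.1 "__" = false := hks.2
  unfold pvG1 pvF1
  rw [lookup_it_eq_get? args2 ex kv.1 hk]
  cases hop : (PySem.Dict.ofList args2).get? kv.1 with
  | none =>
    have hcont : (PySem.Dict.ofList args2).contains kv.1 = false := by
      rw [PySem.Dict.contains_eq_isSome_get?, hop]; rfl

    simp only [hc, hs, hcont]
    simp
  | some v2 =>
    have hcont : (PySem.Dict.ofList args2).contains kv.1 = true := by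
      rw [PySem.Dict.contains_eq_isSome_get?, hop]; rfl
    have hgd : (PySem.Dict.ofList args2).getD kv.1 "" = v2 :=
      PySem.Dict.getD_of_get?_eq_some _ _ hop

    simp only [hc, hs, hcont, hgd]
    simp

-- on kept keys, A's second-loop contribution is the assoc-list classification
theorem pvG2_eq_pvF2 (args1 : List (String × String)) (ex : PySem.Set String) (kv : String × String)
    (hk : pvKeep ex kv.1 = true) :
    pvG2 ex (PySem.Dict.ofList args1) kv
      = pvF2 (PySem.List.sorted (((PySem.Dict.ofList args1).items).filter (fun kv => pvKeep ex kv.1)) (fun kv => kv.1) false) kv := by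
  have hks := hk
  unfold pvKeep at hks
  rw [Bool.and_eq_true, Bool.not_eq_true', Bool.not_eq_true'] at hks
  have hc : ex.contains kv.1 = false := hks.1
  have hs : PySem.Str.startswith kv.1 "__" = false := hks.2
  unfold pvG2 pvF2
  rw [lookup_it_eq_get? args1 ex kv.1 hk]
  cases hop : (PySem.Dict.ofList args1).get? kv.1 with
  | none =>
    have hcont : (PySem.Dict.ofList args1).contains kv.1 = false := by
      rw [PySem.Dict.contains_eq_isSome_get?, hop]; rfl

    simp only [hc, hs, hcont]
    simp
  | some v =>
    have hcont : (PySem.Dict.ofList args1).contains kv.1 = true := by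
      rw [PySem.Dict.contains_eq_isSome_get?, hop]; rfl

    simp only [hc, hs, hcont]
    simp

-- A's loop over all items = the same loop over the kept items only
theorem flatMap_items_eq_filter {β : Type} (l : List (String × String)) (ex : PySem.Set String)
    (f : (String × String) → List β) (hdrop : ∀ kv, pvKeep ex kv.1 = false → f kv = []) :
    l.flatMap f = (l.filter (fun kv => pvKeep ex kv.1)).flatMap f := by
  rw [flatMap_filter_ite]
  apply List.flatMap_congr
  intro kv _
  by_cases h : pvKeep ex kv.1
  · simp [h]
  · simp [eq_false_of_ne_true h, hdrop kv (eq_false_of_ne_true h)]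

theorem pv_main_eq (args1 args2 : List (String × String)) (exclude : List String) :
    diff_params args1 args2 exclude = diff_params_alt args1 args2 exclude := by
  unfold diff_params diff_params_alt
  simp only []
  rw [fold1_eq, fold2_eq, List.nil_append]
  rw [PySem.List.sorted_id_eq_sorted_id_iff_perm]
  have e1 := flatMap_items_eq_filter ((PySem.Dict.ofList args1).items) (PySem.Set.ofList exclude)
    (pvG1 (PySem.Set.ofList exclude) (PySem.Dict.ofList args2))
    (by intro kv h
        unfold pvKeep at h
        rw [Bool.and_eq_false_iff] at h
        simp only [Bool.not_eq_false'] at h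
        unfold pvG1
        rcases h with h' | h' <;> rw [h'] <;> simp)
  have e2 := flatMap_items_eq_filter ((PySem.Dict.ofList args2).items) (PySem.Set.ofList exclude)
    (pvG2 (PySem.Set.ofList exclude) (PySem.Dict.ofList args1))
    (by intro kv h
        unfold pvKeep at h
        rw [Bool.and_eq_false_iff] at h
        simp only [Bool.not_eq_false'] at h
        unfold pvG2
        rcases h with h' | h' <;> rw [h'] <;> simp)
  rw [e1, e2]
  have hp1 : (((PySem.Dict.ofList args1).items).filter (fun kv => pvKeep (PySem.Set.ofList exclude) kv.1)).Perm
      (PySem.List.sorted (((PySem.Dict.ofList args1).items).filter (fun kv => pvKeep (PySem.Set.ofList exclude) kv.1)) (fun kv => kv.1) false) :=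
    (PySem.List.sorted_perm _ _ _).symm
  have hp2 : (((PySem.Dict.ofList args2).items).filter (fun kv => pvKeep (PySem.Set.ofList exclude) kv.1)).Perm
      (PySem.List.sorted (((PySem.Dict.ofList args2).items).filter (fun kv => pvKeep (PySem.Set.ofList exclude) kv.1)) (fun kv => kv.1) false) :=
    (PySem.List.sorted_perm _ _ _).symm
  have q1 : (((PySem.Dict.ofList args1).items).filter (fun kv => pvKeep (PySem.Set.ofList exclude) kv.1)).flatMap
        (pvG1 (PySem.Set.ofList exclude) (PySem.Dict.ofList args2))
      |>.Perm ((PySem.List.sorted (((PySem.Dict.ofList args1).items).filter (fun kv => pvKeep (PySem.Set.ofList exclude) kv.1)) (fun kv => kv.1) false).flatMap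
        (pvF1 (PySem.List.sorted (((PySem.Dict.ofList args2).items).filter (fun kv => pvKeep (PySem.Set.ofList exclude) kv.1)) (fun kv => kv.1) false))) := by
    apply List.Perm.flatMap hp1
    intro kv hkv
    have hk : pvKeep (PySem.Set.ofList exclude) kv.1 = true := by
      simpa using (List.mem_filter.mp hkv).2
    rw [pvG1_eq_pvF1 args2 _ kv hk]
  have q2 : (((PySem.Dict.ofList args2).items).filter (fun kv => pvKeep (PySem.Set.ofList exclude) kv.1)).flatMap
        (pvG2 (PySem.Set.ofList exclude) (PySem.Dict.ofList args1))
      |>.Perm ((PySem.List.sorted (((PySem.Dict.ofList args2).items).filter (fun kv => pvKeep (PySem.Set.ofList exclude) kv.1)) (fun kv => kv.1) false).flatMap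
        (pvF2 (PySem.List.sorted (((PySem.Dict.ofList args1).items).filter (fun kv => pvKeep (PySem.Set.ofList exclude) kv.1)) (fun kv => kv.1) false))) := by
    apply List.Perm.flatMap hp2
    intro kv hkv
    have hk : pvKeep (PySem.Set.ofList exclude) kv.1 = true := by
      simpa using (List.mem_filter.mp hkv).2
    rw [pvG2_eq_pvF2 args1 _ kv hk]
  exact (q1.append q2).trans
    (merge_perm _ _ (pairwise_lt_it args1 _) (pairwise_lt_it args2 _)).symm

-- ===== VERDICT (by name: the statement is the Claim_ definition above) =====
theorem diff_params_spec : Claim_equal_diff_params := by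
  intro args1 args2 exclude _
  unfold Spec_diff_params
  exact pv_main_eq args1 args2 exclude
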